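-- pv_equiv track=rewrite | github.com/joojeehwan/algo | pythonProject/프로그래머스/완전탐색/최소직사각형.py | solution
-- ===== SOURCE A (Python) =====
-- def solution(sizes):
--     big = []
--     small = []
--     answer = 0
--     for namecard in sizes:
--         if namecard[0] > namecard[1]:
--             big.append(namecard[0])
--             small.append(namecard[1])
--
--         else:
--             big.append(namecard[1])
--             small.append(namecard[0])
--     answer = max(big) * max(small)
--
--     return answer
-- ===== SOURCE B (Python) =====
-- def solution(sizes):
--     # Divide and conquer: recursively combine the (largest long side, largest
--     # short side) of each half of the card list, then multiply.
--     def rect(cards):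
--         if len(cards) == 1:
--             c = cards[0]
--             return (max(c[0], c[1]), min(c[0], c[1]))
--         half = len(cards) // 2
--         b1, s1 = rect(cards[:half])
--         b2, s2 = rect(cards[half:])
--         return (max(b1, b2), max(s1, s2))
--     big, small = rect(sizes)
--     return big * small
-- ===== Notes on version B (the rewrite author's own statement) =====
-- stated objective: alternative
-- what changed: Divide-and-conquer recursion: split the card list in halves, recursively compute the pair (largest long side, largest short side) of each half and combine with max, instead of A's linear loop that builds two lists and scans each with max().
import Mathlib
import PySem

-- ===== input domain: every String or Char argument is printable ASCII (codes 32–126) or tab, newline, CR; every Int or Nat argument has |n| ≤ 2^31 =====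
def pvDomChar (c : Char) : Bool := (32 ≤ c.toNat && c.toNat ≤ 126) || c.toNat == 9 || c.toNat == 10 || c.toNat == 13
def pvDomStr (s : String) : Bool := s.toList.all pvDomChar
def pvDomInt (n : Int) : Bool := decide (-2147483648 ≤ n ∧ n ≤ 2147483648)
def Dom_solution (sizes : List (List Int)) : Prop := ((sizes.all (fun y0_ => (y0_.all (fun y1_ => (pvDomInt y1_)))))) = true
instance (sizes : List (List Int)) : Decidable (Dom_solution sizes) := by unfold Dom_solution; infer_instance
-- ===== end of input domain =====

-- B replaces A's loop-plus-two-max-scans by a divide-and-conquer recursion over halves of the list.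

-- ===== PORT A =====
def solution (sizes : List (List Int)) : Int :=
  let p := sizes.foldl (fun (bs : List Int × List Int) namecard =>
    let c0 := PySem.List.pyGetD namecard 0 0
    let c1 := PySem.List.pyGetD namecard 1 0
    if c0 > c1 then (bs.1 ++ [c0], bs.2 ++ [c1]) else (bs.1 ++ [c1], bs.2 ++ [c0]))
    ([], [])
  (PySem.List.max? p.1 (fun y => y)).getD 0 * (PySem.List.max? p.2 (fun y => y)).getD 0

-- ===== PORT B =====
-- rect of Source B; the 'length ≤ 1' guard (instead of '= 1') only makes the Lean
-- recursion total on [], where the Python recursion never terminates (outside Pre_).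
-- 'cards.length / 2' is Nat division = Python's len(cards)//2 on this nonnegative operand.
def pvRect (cards : List (List Int)) : Int × Int :=
  if cards.length ≤ 1 then
    let c := PySem.List.pyGetD cards 0 []
    (max (PySem.List.pyGetD c 0 0) (PySem.List.pyGetD c 1 0),
     min (PySem.List.pyGetD c 0 0) (PySem.List.pyGetD c 1 0))
  else
    let half := cards.length / 2
    let p1 := pvRect (PySem.List.slice cards none (some (half : Int)))
    let p2 := pvRect (PySem.List.slice cards (some (half : Int)) none)
    (max p1.1 p2.1, max p1.2 p2.2)
termination_by cards.length
decreasing_by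
  · simp only [PySem.List.slice_to_natCast, List.length_take]; omega
  · simp only [PySem.List.slice_from_natCast, List.length_drop]; omega

def solution_alt (sizes : List (List Int)) : Int :=
  let p := pvRect sizes
  p.1 * p.2

-- ===== PRECONDITION & SPEC =====
-- A raises on empty sizes (max of empty list, ValueError) and on any card with
-- fewer than 2 entries (IndexError); Pre_ excludes exactly those inputs.
def Pre_solution (sizes : List (List Int)) : Prop :=
  sizes ≠ [] ∧ ∀ c ∈ sizes, 2 ≤ c.length
instance (sizes : List (List Int)) : Decidable (Pre_solution sizes) := by
  unfold Pre_solution; infer_instance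
def pvWitness_solution : List (List Int) := [[60, 50], [30, 70], [60, 30], [80, 40]]

def Spec_solution (sizes : List (List Int)) (out : Int) : Prop := out = solution_alt sizes
instance (sizes : List (List Int)) (out : Int) : Decidable (Spec_solution sizes out) := by
  unfold Spec_solution; infer_instance

-- ===== CLAIM (what is proved, stated in full; the proofs are below) =====
def Claim_equal_solution : Prop :=
  ∀ (sizes : List (List Int)), Dom_solution sizes → Pre_solution sizes →
    Spec_solution sizes (solution sizes)

-- ===== LEMMAS AND PROOFS =====

def pvBig (c : List Int) : Int :=
  max (PySem.List.pyGetD c 0 0) (PySem.List.pyGetD c 1 0)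
def pvSmall (c : List Int) : Int :=
  min (PySem.List.pyGetD c 0 0) (PySem.List.pyGetD c 1 0)

def pvMax : List Int → Int
  | [] => 0
  | x :: xs => xs.foldl max x

lemma foldA_eq (sizes : List (List Int)) (b s : List Int) :
    sizes.foldl (fun (bs : List Int × List Int) namecard =>
      let c0 := PySem.List.pyGetD namecard 0 0
      let c1 := PySem.List.pyGetD namecard 1 0
      if c0 > c1 then (bs.1 ++ [c0], bs.2 ++ [c1]) else (bs.1 ++ [c1], bs.2 ++ [c0]))
      (b, s)
    = (b ++ sizes.map pvBig, s ++ sizes.map pvSmall) := by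
  induction sizes generalizing b s with
  | nil => simp
  | cons c t ih =>
    simp only [List.foldl_cons, List.map_cons]
    split
    · rw [ih]; simp [pvBig, pvSmall]; omega
    · rw [ih]; simp [pvBig, pvSmall]; omega

lemma foldl_max_shift (xs : List Int) (a b : Int) :
    xs.foldl max (max a b) = max a (xs.foldl max b) := by
  induction xs generalizing b with
  | nil => simp
  | cons x t ih => simp only [List.foldl_cons, max_assoc, ih]

lemma pvMax_append (xs ys : List Int) (hx : xs ≠ []) (hy : ys ≠ []) :
    pvMax (xs ++ ys) = max (pvMax xs) (pvMax ys) := by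
  obtain ⟨x, t, rfl⟩ := List.exists_cons_of_ne_nil hx
  obtain ⟨y, u, rfl⟩ := List.exists_cons_of_ne_nil hy
  show ((t ++ y :: u).foldl max x) = _
  rw [List.foldl_append]
  show (u.foldl max (max (t.foldl max x) y)) = _
  rw [foldl_max_shift]
  rfl

lemma pvRect_eq (cards : List (List Int)) (h : cards ≠ []) :
    pvRect cards = (pvMax (cards.map pvBig), pvMax (cards.map pvSmall)) := by
  induction hn : cards.length using Nat.strong_induction_on generalizing cards with
  | _ n ih =>
  rw [pvRect]
  by_cases hle : cards.length ≤ 1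
  · have h1 : cards.length = 1 := by
      have := List.length_pos_of_ne_nil h; omega
    obtain ⟨c, rest, rfl⟩ := List.exists_cons_of_ne_nil h
    have : rest = [] := by simpa using h1
    subst this
    simp [pvMax, pvBig, pvSmall, PySem.List.pyGetD_zero_cons]
  · simp only [hle, if_false]
    have h2 : 2 ≤ cards.length := by omega
    have hhalf1 : 1 ≤ cards.length / 2 := by omega
    have hhalf2 : cards.length / 2 < cards.length := by omega
    rw [PySem.List.slice_to_natCast, PySem.List.slice_from_natCast]
    have htne : cards.take (cards.length / 2) ≠ [] := by
      simp [List.length_pos_iff.symm]; omega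
    have hdne : cards.drop (cards.length / 2) ≠ [] := by
      simp [List.length_pos_iff.symm]; omega
    rw [ih _ (by simp; omega) _ htne rfl, ih _ (by simp; omega) _ hdne rfl]
    have hsplit : cards = cards.take (cards.length / 2) ++ cards.drop (cards.length / 2) :=
      (List.take_append_drop _ _).symm
    conv_rhs => rw [hsplit]
    simp only [List.map_append]
    rw [pvMax_append _ _ (by simpa using htne) (by simpa using hdne),
        pvMax_append _ _ (by simpa using htne) (by simpa using hdne)]

-- ===== VERDICT (by name: the statement is the Claim_ definition above) =====
theorem solution_spec : Claim_equal_solution := by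
  intro sizes _ hpre
  obtain ⟨hne, -⟩ := hpre
  unfold Spec_solution solution solution_alt
  simp only [foldA_eq, List.nil_append]
  rw [pvRect_eq sizes hne]
  obtain ⟨c, rest, rfl⟩ := List.exists_cons_of_ne_nil hne
  simp only [List.map_cons, PySem.List.max?_id_cons, Option.getD_some]
  rfl
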